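-- pv_equiv track=rewrite | github.com/Harrison-1eo/GMT_Randomness_Test | detect/ApproximateEntropy.py | count_subsequences
-- ===== SOURCE A (Python) =====
-- def count_subsequences(bits, m):
--     """
--     Counts the frequency of all subsequences of length m in the binary string bits.
--     """
--     counts = {}
--     for i in range(len(bits) - m + 1):
--         subseq = bits[i:i+m]
--         if subseq in counts:
--             counts[subseq] += 1
--         else:
--             counts[subseq] = 1
--     return counts
-- ===== SOURCE B (Python) =====
-- def count_subsequences(bits, m):
--     """
--     Counts the frequency of all subsequences of length m in the binary string bits.
--
--     Rolling-code rewrite: each window is encoded as a base-1114112 integer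
--     (1114112 = number of Unicode code points, so the encoding is exact),
--     updated in O(1) per step; string keys are built only once per distinct
--     window, at its first occurrence.
--     """
--     n = len(bits)
--     if m < 0 or m > n:
--         return {}
--     if m == 0:
--         return {'': n + 1}
--     vals = [ord(c) for c in bits]
--     base = 1114112 ** (m - 1)
--     code = 0
--     for v in vals[:m]:
--         code = code * 1114112 + v
--     codes = [code]
--     for i in range(n - m):
--         code = (code - vals[i] * base) * 1114112 + vals[i + m]
--         codes.append(code)
--     counts = {}
--     for c in codes:
--         counts[c] = counts.get(c, 0) + 1
--     first = {}
--     for i in range(n - m + 1):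
--         c = codes[i]
--         if c not in first:
--             first[c] = bits[i:i + m]
--     return {first[c]: counts[c] for c in counts}
-- ===== Notes on version B (the rewrite author's own statement) =====
-- stated objective: alternative
-- what changed: B replaces A's hash-a-fresh-m-character-slice-per-position counting by an exact rolling base-1114112 integer encoding of each window (O(1) big-int update per step), counts the integer codes, and builds a string key only once per distinct window at its first occurrence.
-- outside the precondition, e.g. on count_subsequences('ab', -1): A returns {'a': 1, '': 3}, B returns {}
import Mathlib
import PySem

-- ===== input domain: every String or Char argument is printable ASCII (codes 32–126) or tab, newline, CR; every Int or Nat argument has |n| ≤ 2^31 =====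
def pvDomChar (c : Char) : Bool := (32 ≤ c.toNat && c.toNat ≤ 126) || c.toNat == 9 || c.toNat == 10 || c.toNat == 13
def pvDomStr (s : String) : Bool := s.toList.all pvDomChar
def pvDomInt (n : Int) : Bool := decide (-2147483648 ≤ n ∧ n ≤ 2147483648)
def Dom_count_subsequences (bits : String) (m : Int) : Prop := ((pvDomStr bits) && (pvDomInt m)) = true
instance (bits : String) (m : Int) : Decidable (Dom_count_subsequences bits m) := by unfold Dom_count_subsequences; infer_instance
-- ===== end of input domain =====

-- B replaces per-window string slicing/hashing by an exact rolling base-1114112 integer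
-- encoding, building each distinct window's string only once (objective: alternative).


-- ===== PORT A =====
def count_subsequences (bits : String) (m : Int) : List (String × Int) :=
  let counts : PySem.Dict String Int :=
    (PySem.List.pyRange 0 (PySem.Str.len bits - m + 1) 1).foldl
      (fun counts i =>
        let subseq := PySem.Str.slice bits (some i) (some (i + m))
        if counts.contains subseq then counts.modify subseq 0 (· + 1)
        else counts.insert subseq 1)
      PySem.Dict.empty
  counts.items

-- ===== PORT B =====
def count_subsequences_alt (bits : String) (m : Int) : List (String × Int) :=
  let n := PySem.Str.len bits
  if m < 0 ∨ n < m then []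
  else if m = 0 then [("", n + 1)]
  else
    let vals : List Int := bits.toList.map (fun c => (c.toNat : Int))
    let base : Int := 1114112 ^ (m - 1).toNat
    let code0 : Int := (PySem.List.slice vals none (some m)).foldl (fun code v => code * 1114112 + v) 0
    let cc : List Int × Int :=
      (PySem.List.pyRange 0 (n - m) 1).foldl
        (fun (p : List Int × Int) i =>
          let code := (p.2 - (PySem.List.pyGetD vals i 0) * base) * 1114112 + PySem.List.pyGetD vals (i + m) 0
          (p.1 ++ [code], code))
        ([code0], code0)
    let codes := cc.1
    let counts : PySem.Dict Int Int :=
      codes.foldl (fun d c => d.insert c (d.getD c 0 + 1)) PySem.Dict.empty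
    let first : PySem.Dict Int String :=
      (PySem.List.pyRange 0 (n - m + 1) 1).foldl
        (fun d i =>
          let c := PySem.List.pyGetD codes i 0
          if d.contains c then d else d.insert c (PySem.Str.slice bits (some i) (some (i + m))))
        PySem.Dict.empty
    (counts.keys.foldl (fun d c => d.insert (first.getD c "") (counts.getD c 0)) PySem.Dict.empty).items

-- ===== PRECONDITION & SPEC =====
-- Pre_ excludes negative m, where A's slice bits[i:i+m] wraps the negative stop index and
-- returns accidental fragment counts; B naturally returns the empty dict there.
def Pre_count_subsequences (bits : String) (m : Int) : Prop := 0 ≤ m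
instance (bits : String) (m : Int) : Decidable (Pre_count_subsequences bits m) := by unfold Pre_count_subsequences; infer_instance
def pvWitness_count_subsequences : String × Int := ("0110010", 2)

def Spec_count_subsequences (bits : String) (m : Int) (out : List (String × Int)) : Prop := out = count_subsequences_alt bits m
instance (bits : String) (m : Int) (out : List (String × Int)) : Decidable (Spec_count_subsequences bits m out) := by unfold Spec_count_subsequences; infer_instance

-- ===== CLAIM (what is proved, stated in full; the proofs are below) =====
def Claim_equal_count_subsequences : Prop := ∀ (bits : String) (m : Int), Dom_count_subsequences bits m → Pre_count_subsequences bits m → Spec_count_subsequences bits m (count_subsequences bits m)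

-- ===== LEMMAS AND PROOFS =====

-- ord of a character, as an Int
def pvOrd (c : Char) : Int := (c.toNat : Int)

-- base-1114112 encoding of a character list
def pvEnc (l : List Char) : Int := l.foldl (fun a c => a * 1114112 + pvOrd c) 0

-- encoding of a string
def pvEncS (s : String) : Int := pvEnc s.toList

-- window j of length k over cs
def pvWin (cs : List Char) (k j : Nat) : List Char := (cs.drop j).take k

-- the list of windows of bits, as strings (the keys A counts)
def pvWstr (bits : String) (m : Int) : List String :=
  (List.range ((PySem.Str.len bits - m + 1).toNat)).map
    (fun (j : Nat) => PySem.Str.slice bits (some (j : Int)) (some ((j : Int) + m)))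

theorem pvOrd_lt (c : Char) : pvOrd c < 1114112 := by
  have h2 := c.valid
  unfold pvOrd
  rcases h2 with h2 | ⟨h2, h3⟩
  · exact_mod_cast Nat.lt_trans h2 (by norm_num)
  · exact_mod_cast h3

theorem pvOrd_nonneg (c : Char) : 0 ≤ pvOrd c := Int.natCast_nonneg _

theorem pvOrd_inj {c d : Char} (h : pvOrd c = pvOrd d) : c = d := by
  unfold pvOrd at h
  have : c.toNat = d.toNat := by exact_mod_cast h
  have : c.val.toNat = d.val.toNat := this
  exact Char.ext (UInt32.toNat_inj.mp this)

theorem pvEnc_foldl_init (l : List Char) (a : Int) :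
    l.foldl (fun x c => x * 1114112 + pvOrd c) a = a * 1114112 ^ l.length + pvEnc l := by
  induction l generalizing a with
  | nil => simp [pvEnc]
  | cons c t ih =>
    simp only [List.foldl_cons, pvEnc, List.length_cons]
    rw [ih (a * 1114112 + pvOrd c), ih (0 * 1114112 + pvOrd c)]
    ring

theorem pvEnc_cons (c : Char) (l : List Char) :
    pvEnc (c :: l) = pvOrd c * 1114112 ^ l.length + pvEnc l := by
  have := pvEnc_foldl_init l (0 * 1114112 + pvOrd c)
  simpa [pvEnc] using this

theorem pvEnc_append (l : List Char) (c : Char) :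
    pvEnc (l ++ [c]) = pvEnc l * 1114112 + pvOrd c := by
  simp [pvEnc, List.foldl_append]

theorem pvEnc_nonneg (l : List Char) : 0 ≤ pvEnc l := by
  induction l with
  | nil => simp [pvEnc]
  | cons c t ih =>
    rw [pvEnc_cons]
    have h1 := pvOrd_nonneg c
    have h2 : (0:Int) ≤ 1114112 ^ t.length := by positivity
    nlinarith

theorem pvEnc_lt (l : List Char) : pvEnc l < 1114112 ^ l.length := by
  induction l with
  | nil => simp [pvEnc]
  | cons c t ih =>
    rw [pvEnc_cons, List.length_cons]
    have h1 := pvOrd_lt c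
    have h2 : (0:Int) ≤ 1114112 ^ t.length := by positivity
    have h3 : pvOrd c * 1114112 ^ t.length ≤ 1114111 * 1114112 ^ t.length := by nlinarith
    calc pvOrd c * 1114112 ^ t.length + pvEnc t
        < pvOrd c * 1114112 ^ t.length + 1114112 ^ t.length := by omega
      _ ≤ 1114111 * 1114112 ^ t.length + 1114112 ^ t.length := by omega
      _ = 1114112 ^ (t.length + 1) := by ring

theorem pvEnc_inj : ∀ (l1 l2 : List Char), l1.length = l2.length → pvEnc l1 = pvEnc l2 → l1 = l2 := by
  intro l1
  induction l1 with
  | nil =>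
    intro l2 hlen _
    exact (List.length_eq_zero_iff.mp hlen.symm).symm ▸ rfl
  | cons c t ih =>
    intro l2 hlen henc
    cases l2 with
    | nil => simp at hlen
    | cons d u =>
      have hl : t.length = u.length := by simpa using hlen
      rw [pvEnc_cons, pvEnc_cons, hl] at henc
      have hP : (0:Int) < 1114112 ^ u.length := by positivity
      have b1 := pvEnc_nonneg t
      have b2 := pvEnc_lt t
      have b3 := pvEnc_nonneg u
      have b4 := pvEnc_lt u
      rw [hl] at b2
      have hcd : pvOrd c = pvOrd d := by nlinarith
      have ht : pvEnc t = pvEnc u := by nlinarith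
      rw [pvOrd_inj hcd, ih u hl ht]

theorem pv_step_modify {κ : Type} [BEq κ] [LawfulBEq κ] (d : PySem.Dict κ Int) (w : κ) :
    (if d.contains w then d.modify w 0 (· + 1) else d.insert w 1) = d.modify w 0 (· + 1) := by
  by_cases h : d.contains w
  · simp [h]
  · have h' : d.contains w = false := by simpa using h
    simp [h', PySem.Dict.modify, PySem.Dict.getD_of_not_contains _ _ h']

-- A's loop is the Counter loop over the window strings
theorem pv_A_norm (bits : String) (m : Int) :
    count_subsequences bits m =
      (PySem.Set.ofList (pvWstr bits m)).map
        (fun w => (w, (List.count w (pvWstr bits m) : Int))) := by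
  unfold count_subsequences pvWstr
  rw [PySem.List.pyRange_one]
  simp only [sub_zero, zero_add]
  rw [List.foldl_map]
  rw [PySem.List.foldl_congr_mem _ _
    (fun (d : PySem.Dict String Int) (j : Nat) =>
      d.modify (PySem.Str.slice bits (some (j : Int)) (some ((j : Int) + m))) 0 (· + 1)) _
    (fun acc x _ => pv_step_modify acc (PySem.Str.slice bits (some (x : Int)) (some ((x : Int) + m))))]
  rw [← List.foldl_map (f := fun (j : Nat) => PySem.Str.slice bits (some (j : Int)) (some ((j : Int) + m)))
      (g := fun (d : PySem.Dict String Int) w => d.modify w 0 (· + 1))]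
  rw [← PySem.Dict.counter_eq_foldl]
  rw [PySem.Dict.items_counter]

-- the rolling-code update is exact
theorem pv_roll (cs : List Char) (k j : Nat) (hk : 0 < k) (hj : j + k < cs.length) :
    pvEnc (pvWin cs k (j + 1)) =
      (pvEnc (pvWin cs k j) - pvOrd (cs[j]'(by omega)) * 1114112 ^ (k - 1)) * 1114112
        + pvOrd (cs[j + k]'hj) := by
  obtain ⟨k', rfl⟩ : ∃ k', k = k' + 1 := ⟨k - 1, by omega⟩
  have hlt : k' < (cs.drop (j + 1)).length := by
    rw [List.length_drop]; omega
  have e1 : pvWin cs (k' + 1) j = cs[j]'(by omega) :: (cs.drop (j + 1)).take k' := by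
    unfold pvWin
    rw [List.drop_eq_getElem_cons (by omega), List.take_succ_cons]
  have e2 : pvWin cs (k' + 1) (j + 1) = (cs.drop (j + 1)).take k' ++ [cs[j + (k' + 1)]'hj] := by
    unfold pvWin
    rw [List.take_add_one, List.getElem?_eq_getElem hlt]
    simp only [Option.toList_some]
    simp only [List.getElem_drop]
    simp only [show j + 1 + k' = j + (k' + 1) from by omega]
  have e3 : ((cs.drop (j + 1)).take k').length = k' := by
    rw [List.length_take, List.length_drop]; omega
  rw [e1, e2, pvEnc_cons, pvEnc_append, e3]
  simp only [Nat.add_sub_cancel]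
  ring

-- the codes loop produces exactly the encodings of all windows
theorem pv_codes (cs : List Char) (k : Nat) (hk : 0 < k) (hkn : k ≤ cs.length) :
    ∀ (j : Nat), j ≤ cs.length - k →
    ((List.range j).foldl
      (fun (p : List Int × Int) (i : Nat) =>
        let code := (p.2 - (PySem.List.pyGetD (cs.map pvOrd) (i : Int) 0) * 1114112 ^ (k - 1)) * 1114112
                    + PySem.List.pyGetD (cs.map pvOrd) ((i : Int) + (k : Int)) 0
        (p.1 ++ [code], code))
      ([pvEnc (pvWin cs k 0)], pvEnc (pvWin cs k 0)))
    = ((List.range (j + 1)).map (fun i => pvEnc (pvWin cs k i)), pvEnc (pvWin cs k j)) := by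
  intro j
  induction j with
  | zero => intro _; simp
  | succ j ih =>
    intro hj
    rw [List.range_succ, List.foldl_append, ih (by omega)]
    simp only [List.foldl_cons, List.foldl_nil]
    have hj1 : j < cs.length := by omega
    have hj2 : j + k < cs.length := by omega
    have g1 : PySem.List.pyGetD (cs.map pvOrd) ((j : Nat) : Int) 0 = pvOrd (cs[j]'hj1) := by
      rw [PySem.List.pyGetD_natCast, List.getD_eq_getElem _ _ (by simpa using hj1)]
      simp
    have g2 : PySem.List.pyGetD (cs.map pvOrd) (((j : Nat) : Int) + (k : Int)) 0 = pvOrd (cs[j + k]'hj2) := by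
      have : ((j : Nat) : Int) + (k : Int) = ((j + k : Nat) : Int) := by push_cast; ring
      rw [this, PySem.List.pyGetD_natCast, List.getD_eq_getElem _ _ (by simpa using hj2)]
      simp
    rw [g1, g2]
    have hr := pv_roll cs k j hk hj2
    rw [← hr, show List.range (j + 1 + 1) = List.range (j + 1) ++ [j + 1] from List.range_succ, List.map_append]
    simp

-- the "insert only if new" loop: first pair for each key wins
theorem pv_get?_firstwins {κ ν : Type} [BEq κ] [LawfulBEq κ] (P : List (κ × ν)) :
    ∀ (d : PySem.Dict κ ν) (x : κ),
    (P.foldl (fun d p => if d.contains p.1 then d else d.insert p.1 p.2) d).get? x =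
      (d.get? x).or ((P.find? (fun p => p.1 == x)).map (·.2)) := by
  induction P with
  | nil => intro d x; simp
  | cons p t ih =>
    intro d x
    simp only [List.foldl_cons]
    by_cases hc : d.contains p.1
    · rw [if_pos hc, ih d x, List.find?_cons]
      by_cases hx : p.1 = x
      · subst hx
        obtain ⟨v, hv⟩ : ∃ v, d.get? p.1 = some v := by
          rw [← Option.isSome_iff_exists, ← PySem.Dict.contains_eq_isSome_get?]; exact hc
        simp [hv]
      · simp [beq_eq_false_iff_ne.mpr hx]
    · have hc' : d.contains p.1 = false := by simpa using hc
      rw [if_neg hc, ih _ x, List.find?_cons]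
      by_cases hx : p.1 = x
      · subst hx
        rw [PySem.Dict.get?_insert_self, (PySem.Dict.get?_eq_none_iff_contains d p.1).mpr hc']
        simp
      · rw [PySem.Dict.get?_insert_of_ne _ _ (Ne.symm hx)]
        simp [beq_eq_false_iff_ne.mpr hx]

-- Set.ofList commutes with an injective-on-the-list map
theorem pv_foldl_add_map {α β : Type} [BEq α] [LawfulBEq α] [BEq β] [LawfulBEq β] (f : α → β) :
    ∀ (xs acc : List α),
    (∀ a ∈ xs, ∀ b ∈ xs ++ acc, f a = f b → a = b) →
    List.foldl PySem.Set.add (acc.map f) (xs.map f) = (List.foldl PySem.Set.add acc xs).map f := by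
  intro xs
  induction xs with
  | nil => intro acc _; simp
  | cons x t ih =>
    intro acc h
    simp only [List.map_cons, List.foldl_cons]
    have hmem : f x ∈ acc.map f ↔ x ∈ acc := by
      constructor
      · intro hm
        obtain ⟨b, hb, hfb⟩ := List.mem_map.mp hm
        exact (h x (by simp) b (by simp [hb]) hfb.symm) ▸ hb
      · intro hm; exact List.mem_map.mpr ⟨x, hm, rfl⟩
    by_cases hx : x ∈ acc
    · have e1 : PySem.Set.add (acc.map f) (f x) = acc.map f := by
        simp [PySem.Set.add, hmem.mpr hx]
      have e2 : PySem.Set.add acc x = acc := by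
        simp [PySem.Set.add, hx]
      rw [e1, e2]
      exact ih acc (fun a ha b hb => h a (by simp [ha]) b (by
        simp only [List.mem_append] at hb ⊢
        rcases hb with hb | hb
        · exact Or.inl (by simp [hb])
        · exact Or.inr hb))
    · have e1 : PySem.Set.add (acc.map f) (f x) = (acc ++ [x]).map f := by
        simp [PySem.Set.add, hmem, hx]
      have e2 : PySem.Set.add acc x = acc ++ [x] := by
        simp [PySem.Set.add, hx]
      rw [e1, e2]
      exact ih (acc ++ [x]) (fun a ha b hb => h a (by simp [ha]) b (by
        simp only [List.mem_append, List.mem_singleton] at hb ⊢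
        rcases hb with hb | hb | hb
        · exact Or.inl (by simp [hb])
        · exact Or.inr hb
        · exact Or.inl (by simp [hb])))

theorem pv_ofList_map {α β : Type} [BEq α] [LawfulBEq α] [BEq β] [LawfulBEq β] (f : α → β)
    (xs : List α) (h : ∀ a ∈ xs, ∀ b ∈ xs, f a = f b → a = b) :
    PySem.Set.ofList (xs.map f) = (PySem.Set.ofList xs).map f := by
  have := pv_foldl_add_map f xs [] (by simpa using h)
  simpa [PySem.Set.ofList, PySem.Set.empty] using this

-- counting through an injective-on-the-list map
theorem pv_count_map {α β : Type} [BEq α] [LawfulBEq α] [BEq β] [LawfulBEq β] (f : α → β)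
    (xs : List α) (a : α) (h : ∀ x ∈ xs, f x = f a → x = a) :
    List.count (f a) (xs.map f) = List.count a xs := by
  rw [List.count_eq_countP, List.count_eq_countP, List.countP_map]
  apply List.countP_congr
  intro x hx
  simp only [Function.comp_apply, beq_iff_eq]
  exact ⟨h x hx, fun hxa => by rw [hxa]⟩

theorem pv_find?_congr {α : Type} (p q : α → Bool) :
    ∀ (l : List α), (∀ x ∈ l, p x = q x) → l.find? p = l.find? q := by
  intro l
  induction l with
  | nil => intro _; rfl
  | cons x t ih =>
    intro h
    rw [List.find?_cons, List.find?_cons, h x (by simp)]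
    cases q x
    · exact ih (fun y hy => h y (by simp [hy]))
    · rfl

theorem pv_find?_beq {α : Type} [BEq α] [LawfulBEq α] (w : α) :
    ∀ (l : List α), w ∈ l → l.find? (fun x => x == w) = some w := by
  intro l
  induction l with
  | nil => intro h; simp at h
  | cons x t ih =>
    intro h
    rw [List.find?_cons]
    by_cases hx : x = w
    · simp [hx]
    · rw [beq_eq_false_iff_ne.mpr hx]
      rcases List.mem_cons.mp h with h | h
      · exact absurd h.symm hx
      · exact ih h

theorem pv_ofList_replicate {α : Type} [BEq α] [LawfulBEq α] (x : α) :
    ∀ (n : Nat), PySem.Set.ofList (List.replicate (n + 1) x) = [x] := by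
  have key : ∀ (n : Nat), List.foldl PySem.Set.add [x] (List.replicate n x) = [x] := by
    intro n
    induction n with
    | zero => rfl
    | succ n ih =>
      rw [List.replicate_succ, List.foldl_cons]
      have : PySem.Set.add [x] x = [x] := by simp [PySem.Set.add]
      rw [this, ih]
  intro n
  show List.foldl PySem.Set.add PySem.Set.empty _ = _
  rw [List.replicate_succ, List.foldl_cons]
  have : PySem.Set.add PySem.Set.empty x = [x] := by simp [PySem.Set.add, PySem.Set.empty]
  rw [this, key]

-- the window string, as a character list
theorem pv_slice_toList (bits : String) (k j : Nat) :
    (PySem.Str.slice bits (some (j : Int)) (some ((j : Int) + (k : Int)))).toList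
      = pvWin bits.toList k j := by
  rw [PySem.Str.toList_slice]
  show PySem.List.slice _ _ _ = _
  rw [PySem.List.slice_natCast_add]
  rfl

theorem pv_win_len (cs : List Char) (k j : Nat) (h : j + k ≤ cs.length) :
    (pvWin cs k j).length = k := by
  simp only [pvWin, List.length_take, List.length_drop]
  omega

theorem pv_mem_wstr (bits : String) (m : Int) (w : String) (hw : w ∈ pvWstr bits m) :
    ∃ j < (PySem.Str.len bits - m + 1).toNat,
      w = PySem.Str.slice bits (some (j : Int)) (some ((j : Int) + m)) := by
  obtain ⟨j, hj, rfl⟩ := List.mem_map.mp hw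
  exact ⟨j, List.mem_range.mp hj, rfl⟩

-- windows are pairwise distinguished by their encodings
theorem pv_wstr_inj (bits : String) (m : Int) (h1 : 0 < m) (h2 : m ≤ PySem.Str.len bits) :
    ∀ a ∈ pvWstr bits m, ∀ b ∈ pvWstr bits m, pvEncS a = pvEncS b → a = b := by
  intro a ha b hb hab
  obtain ⟨ja, hja, rfl⟩ := pv_mem_wstr bits m a ha
  obtain ⟨jb, hjb, rfl⟩ := pv_mem_wstr bits m b hb
  have hm : m = ((m.toNat : Nat) : Int) := by omega
  have hn : (PySem.Str.len bits - m + 1).toNat = bits.toList.length - m.toNat + 1 := by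
    rw [PySem.Str.len_eq] at h2 ⊢
    omega
  have ta : (PySem.Str.slice bits (some (ja : Int)) (some ((ja : Int) + m))).toList
      = pvWin bits.toList m.toNat ja := by rw [hm]; exact pv_slice_toList bits m.toNat ja
  have tb : (PySem.Str.slice bits (some (jb : Int)) (some ((jb : Int) + m))).toList
      = pvWin bits.toList m.toNat jb := by rw [hm]; exact pv_slice_toList bits m.toNat jb
  have hk : m.toNat ≤ bits.toList.length := by
    rw [PySem.Str.len_eq] at h2; omega
  rw [hn] at hja hjb
  have la : (pvWin bits.toList m.toNat ja).length = m.toNat := by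
    apply pv_win_len; omega
  have lb : (pvWin bits.toList m.toNat jb).length = m.toNat := by
    apply pv_win_len; omega
  have henc : pvEnc (pvWin bits.toList m.toNat ja) = pvEnc (pvWin bits.toList m.toNat jb) := by
    unfold pvEncS at hab
    rw [ta, tb] at hab
    exact hab
  have := pvEnc_inj _ _ (la.trans lb.symm) henc
  have htl : (PySem.Str.slice bits (some (ja : Int)) (some ((ja : Int) + m))).toList
      = (PySem.Str.slice bits (some (jb : Int)) (some ((jb : Int) + m))).toList := by
    rw [ta, tb, this]
  calc PySem.Str.slice bits (some (ja : Int)) (some ((ja : Int) + m))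
      = String.ofList (PySem.Str.slice bits (some (ja : Int)) (some ((ja : Int) + m))).toList := String.ofList_toList.symm
    _ = String.ofList (PySem.Str.slice bits (some (jb : Int)) (some ((jb : Int) + m))).toList := by rw [htl]
    _ = PySem.Str.slice bits (some (jb : Int)) (some ((jb : Int) + m)) := String.ofList_toList

-- the port-shaped codes expression, normalized
theorem pv_codes_port (cs : List Char) (k : Nat) (hk : 0 < k) (hkn : k ≤ cs.length) :
    (List.foldl
      (fun (p : List Int × Int) (i : Int) =>
        ((p.1 ++
            [(p.2 - PySem.List.pyGetD (cs.map pvOrd) i 0 * 1114112 ^ (((k : Int)) - 1).toNat) * 1114112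
              + PySem.List.pyGetD (cs.map pvOrd) (i + (k : Int)) 0],
          (p.2 - PySem.List.pyGetD (cs.map pvOrd) i 0 * 1114112 ^ (((k : Int)) - 1).toNat) * 1114112
            + PySem.List.pyGetD (cs.map pvOrd) (i + (k : Int)) 0)))
      ([List.foldl (fun code v => code * 1114112 + v) 0
          (PySem.List.slice (cs.map pvOrd) none (some (k : Int)))],
        List.foldl (fun code v => code * 1114112 + v) 0
          (PySem.List.slice (cs.map pvOrd) none (some (k : Int))))
      (PySem.List.pyRange 0 ((cs.length : Int) - (k : Int)))).1
    = (List.range (cs.length - k + 1)).map (fun i => pvEnc (pvWin cs k i)) := by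
  have he0 : List.foldl (fun code v => code * 1114112 + v) 0
      (PySem.List.slice (cs.map pvOrd) none (some (k : Int))) = pvEnc (pvWin cs k 0) := by
    rw [PySem.List.slice_to_natCast, ← List.map_take, List.foldl_map]
    simp [pvEnc, pvWin]
  rw [he0, PySem.List.pyRange_one]
  simp only [zero_add, sub_zero]
  rw [List.foldl_map]
  have ht : ((cs.length : Int) - (k : Int)).toNat = cs.length - k := by omega
  rw [ht]
  have hfin : cs.length - k + 1 = (cs.length - k) + 1 := rfl
  rw [hfin]
  rw [show (((k : Int)) - 1).toNat = k - 1 from by omega]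
  have h := pv_codes cs k hk hkn (cs.length - k) le_rfl
  exact congrArg Prod.fst h

-- the codes list is the encoded window-string list
theorem pv_codes_eq (bits : String) (k : Nat) (hkn : k ≤ bits.toList.length) :
    (List.range (bits.toList.length - k + 1)).map (fun i => pvEnc (pvWin bits.toList k i))
      = (pvWstr bits (k : Int)).map pvEncS := by
  unfold pvWstr
  rw [PySem.Str.len_eq]
  have hN : (((bits.toList.length : Nat) : Int) - (k : Int) + 1).toNat = bits.toList.length - k + 1 := by
    omega
  rw [hN, List.map_map]
  apply List.map_congr_left
  intro j _
  show pvEnc (pvWin bits.toList k j) = pvEncS (PySem.Str.slice bits (some (j : Int)) (some ((j : Int) + (k : Int))))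
  unfold pvEncS
  rw [pv_slice_toList]

-- length of the window-string list
theorem pv_wstr_length (bits : String) (k : Nat) (hkn : k ≤ bits.toList.length) :
    (pvWstr bits (k : Int)).length = bits.toList.length - k + 1 := by
  unfold pvWstr
  rw [PySem.Str.len_eq, List.length_map, List.length_range]
  omega

-- indexing the window-string list
theorem pv_wstr_getElem (bits : String) (k : Nat) (hkn : k ≤ bits.toList.length)
    (j : Nat) (hj : j < bits.toList.length - k + 1) :
    (pvWstr bits (k : Int))[j]'(by rw [pv_wstr_length bits k hkn]; exact hj)
      = PySem.Str.slice bits (some (j : Int)) (some ((j : Int) + (k : Int))) := by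
  unfold pvWstr
  simp only [List.getElem_map, List.getElem_range]

-- the first-occurrence dict maps each window's code back to the window
theorem pv_first_getD (bits : String) (k : Nat) (hk : 0 < k) (hkn : k ≤ bits.toList.length)
    (w : String) (hw : w ∈ pvWstr bits (k : Int)) :
    (List.foldl
      (fun (d : PySem.Dict Int String) (i : Int) =>
        if d.contains (PySem.List.pyGetD ((pvWstr bits (k : Int)).map pvEncS) i 0) = true then d
        else d.insert (PySem.List.pyGetD ((pvWstr bits (k : Int)).map pvEncS) i 0)
               (PySem.Str.slice bits (some i) (some (i + (k : Int)))))
      PySem.Dict.empty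
      (PySem.List.pyRange 0 ((bits.toList.length : Int) - (k : Int) + 1))).getD (pvEncS w) "" = w := by
  have hN : (((bits.toList.length : Int) - (k : Int) + 1) - 0).toNat = bits.toList.length - k + 1 := by
    omega
  rw [PySem.List.pyRange_one]
  simp only [zero_add]
  rw [hN, List.foldl_map]
  have hlen : ((pvWstr bits (k : Int)).map pvEncS).length = bits.toList.length - k + 1 := by
    rw [List.length_map, pv_wstr_length bits k hkn]
  rw [PySem.List.foldl_congr_mem _ _
    (fun (d : PySem.Dict Int String) (j : Nat) =>
      (fun (d : PySem.Dict Int String) (p : Int × String) =>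
        if d.contains p.1 then d else d.insert p.1 p.2) d
        (((pvWstr bits (k : Int)).map pvEncS).getD j 0,
          PySem.Str.slice bits (some (j : Int)) (some ((j : Int) + (k : Int))))) _
    (by
      intro acc x _
      simp only [PySem.List.pyGetD_natCast])]
  rw [← List.foldl_map
    (f := fun (j : Nat) => (((pvWstr bits (k : Int)).map pvEncS).getD j 0,
        PySem.Str.slice bits (some (j : Int)) (some ((j : Int) + (k : Int)))))
    (g := fun (d : PySem.Dict Int String) (p : Int × String) =>
        if d.contains p.1 then d else d.insert p.1 p.2)]
  rw [PySem.Dict.getD_eq_get?_getD, pv_get?_firstwins]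
  rw [PySem.Dict.get?_empty, Option.none_or]
  have hP : (List.range (bits.toList.length - k + 1)).map
      (fun (j : Nat) => (((pvWstr bits (k : Int)).map pvEncS).getD j 0,
        PySem.Str.slice bits (some (j : Int)) (some ((j : Int) + (k : Int)))))
      = (pvWstr bits (k : Int)).map (fun w' => (pvEncS w', w')) := by
    conv_rhs => rw [pvWstr, PySem.Str.len_eq]
    rw [show (((bits.toList.length : Nat) : Int) - (k : Int) + 1).toNat = bits.toList.length - k + 1 from by omega]
    rw [List.map_map]
    apply List.map_congr_left
    intro j hj
    have hj' : j < bits.toList.length - k + 1 := List.mem_range.mp hj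
    have hjlt : j < ((pvWstr bits (k : Int)).map pvEncS).length := by
      rw [hlen]; exact hj'
    have h1 : (((pvWstr bits (k : Int)).map pvEncS).getD j 0)
        = pvEncS (PySem.Str.slice bits (some (j : Int)) (some ((j : Int) + (k : Int)))) := by
      rw [List.getD_eq_getElem _ _ hjlt]
      simp only [List.getElem_map]
      rw [pv_wstr_getElem bits k hkn j hj']
    rw [h1]
    rfl
  rw [hP, List.find?_map]
  rw [pv_find?_congr _ (fun w' => w' == w) _
    (by
      intro x hx
      simp only [Function.comp_apply]
      by_cases hxw : x = w
      · subst hxw; simp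
      · have hne : pvEncS x ≠ pvEncS w := fun he => hxw (pv_wstr_inj bits (k : Int) (by exact_mod_cast hk) (by rw [PySem.Str.len_eq]; exact_mod_cast hkn) x hx w hw he)
        rw [beq_eq_false_iff_ne.mpr hne, beq_eq_false_iff_ne.mpr hxw])]
  rw [pv_find?_beq w _ hw]
  rfl

-- main case: one window exists (0 < m ≤ len)
theorem pv_main (bits : String) (m : Int) (h1 : 0 < m) (h2 : m ≤ PySem.Str.len bits) :
    count_subsequences bits m = count_subsequences_alt bits m := by
  obtain ⟨k, hk⟩ : ∃ k : Nat, m = (k : Int) := ⟨m.toNat, by omega⟩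
  subst hk
  have hkpos : 0 < k := by exact_mod_cast h1
  have hkn : k ≤ bits.toList.length := by
    rw [PySem.Str.len_eq] at h2; exact_mod_cast h2
  simp only [count_subsequences_alt]
  rw [if_neg (by push Not; omega), if_neg (by exact_mod_cast hkpos.ne')]
  rw [pv_A_norm, PySem.Str.len_eq]
  rw [show (fun c : Char => (c.toNat : Int)) = pvOrd from rfl]
  rw [pv_codes_port bits.toList k hkpos hkn]
  rw [PySem.Dict.foldl_insert_getD_add_one_eq_counter]
  rw [pv_codes_eq bits k hkn]
  rw [PySem.Dict.keys_counter]
  have hinj := pv_wstr_inj bits (k : Int) (by exact_mod_cast hkpos) (by rw [PySem.Str.len_eq]; exact_mod_cast hkn)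
  rw [pv_ofList_map pvEncS _ hinj]
  rw [List.foldl_map]
  rw [PySem.List.foldl_congr_mem _ _
    (fun (d : PySem.Dict String Int) (w : String) =>
      d.insert w ((List.count w (pvWstr bits (k : Int)) : Int))) _
    (by
      intro acc w hw
      have hw' : w ∈ pvWstr bits (k : Int) := (PySem.Set.mem_ofList _ _).mp hw
      congr 1
      · exact pv_first_getD bits k hkpos hkn w hw'
      · rw [PySem.Dict.getD_counter]
        congr 1
        exact pv_count_map pvEncS _ w (fun x hx he => hinj x hx w hw' he))]
  rw [PySem.Dict.items_foldl_insert_fresh _ (fun w => w) _ _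
    (fun a _ => PySem.Dict.contains_empty a)
    (by rw [List.map_id']; exact PySem.Set.nodup_ofList _)]
  rfl

-- ===== VERDICT (by name: the statement is the Claim_ definition above) =====
theorem count_subsequences_spec : Claim_equal_count_subsequences := by
  intro bits m _ hpre
  unfold Spec_count_subsequences
  have hpre' : 0 ≤ m := hpre
  by_cases hbig : PySem.Str.len bits < m
  · -- no windows at all: both sides are the empty dict
    rw [pv_A_norm]
    have hN : (PySem.Str.len bits - m + 1).toNat = 0 := by omega
    have : pvWstr bits m = [] := by unfold pvWstr; rw [hN]; rfl
    rw [this]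
    unfold count_subsequences_alt
    rw [if_pos (Or.inr hbig)]
    simp [PySem.Set.ofList, PySem.Set.empty]
  · by_cases hz : m = 0
    · -- empty window at each of the len+1 positions
      subst hz
      rw [pv_A_norm]
      have hN : (PySem.Str.len bits - 0 + 1).toNat = bits.toList.length + 1 := by
        rw [PySem.Str.len_eq]; omega
      have hws : pvWstr bits 0 = List.replicate (bits.toList.length + 1) "" := by
        unfold pvWstr
        rw [hN]
        rw [show ∀ N : Nat, List.replicate N ("":String) = (List.range N).map (fun _ => "") from
          fun N => by rw [List.map_const']; simp, List.map_inj_left]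
        intro j _
        have : (PySem.Str.slice bits (some (j : Int)) (some ((j : Int) + 0))).toList
            = pvWin bits.toList 0 j := by
          have := pv_slice_toList bits 0 j
          simpa using this
        have : (PySem.Str.slice bits (some (j : Int)) (some ((j : Int) + 0))).toList = [] := by
          rw [this]; simp [pvWin]
        calc PySem.Str.slice bits (some (j : Int)) (some ((j : Int) + 0))
            = String.ofList (PySem.Str.slice bits (some (j : Int)) (some ((j : Int) + 0))).toList := String.ofList_toList.symm
          _ = "" := by rw [this]
      rw [hws, pv_ofList_replicate]
      unfold count_subsequences_alt
      rw [if_neg (by push Not; constructor <;> omega), if_pos rfl]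
      simp only [List.map_cons, List.map_nil, List.count_replicate_self]
      rw [PySem.Str.len_eq]
      norm_num
    · exact pv_main bits m (by omega) (by omega)
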